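-- pv_equiv track=rewrite | github.com/kheshav-coder/day9 | q5.py | check
-- ===== SOURCE A (Python) =====
-- def check(s):
--     l=s.split(" ")
--     k=""
--     for i in l:
--         k+=i
--     x=0
--     d={}
--     for i in k:
--         d[i]=x
--         x+=1
--     return len(d)==26
-- ===== SOURCE B (Python) =====
-- def check(s):
--     t = sorted(s.replace(" ", ""))
--     cnt = 0
--     prev = None
--     for c in t:
--         if c != prev:
--             cnt += 1
--             prev = c
--     return cnt == 26
-- ===== Notes on version B (the rewrite author's own statement) =====
-- stated objective: alternative
-- what changed: Replaces the split/concatenate pass and the hash-dict distinct count with a space-removal plus sort and a single adjacency scan over the sorted characters that counts distinct characters.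
import Mathlib
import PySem

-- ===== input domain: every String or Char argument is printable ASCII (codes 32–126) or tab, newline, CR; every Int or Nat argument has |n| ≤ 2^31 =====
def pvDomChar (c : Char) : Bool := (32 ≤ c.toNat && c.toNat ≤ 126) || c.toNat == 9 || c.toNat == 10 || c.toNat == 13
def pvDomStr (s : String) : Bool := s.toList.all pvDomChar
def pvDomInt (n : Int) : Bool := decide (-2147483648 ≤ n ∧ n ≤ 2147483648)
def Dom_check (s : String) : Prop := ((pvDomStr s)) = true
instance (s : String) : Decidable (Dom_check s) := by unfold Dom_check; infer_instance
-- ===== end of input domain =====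

-- B removes spaces and counts distinct characters by one adjacency scan of the sorted
-- characters (no hash table); same return value, alternative algorithm.

-- ===== PORT A =====
def check (s : String) : Bool :=
  let l := PySem.Chars.splitOn s.toList [' ']
  let k := l.foldl (fun k i => k ++ i) ([] : List Char)
  let r := k.foldl (fun (p : PySem.Dict Char Int × Int) i => (p.1.insert i p.2, p.2 + 1))
    ((PySem.Dict.empty : PySem.Dict Char Int), (0 : Int))
  r.1.size == 26

-- ===== PORT B =====
def check_alt (s : String) : Bool :=
  let t := PySem.List.sorted (PySem.Chars.replace s.toList [' '] []) (fun c => c)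
  let r := t.foldl
    (fun (p : Nat × Option Char) c => if some c ≠ p.2 then (p.1 + 1, some c) else p)
    ((0 : Nat), (none : Option Char))
  r.1 == 26

-- ===== PRECONDITION & SPEC =====
def Spec_check (s : String) (out : Bool) : Prop := out = check_alt s
instance (s : String) (out : Bool) : Decidable (Spec_check s out) := by unfold Spec_check; infer_instance

-- ===== CLAIM (what is proved, stated in full; the proofs are below) =====
def Claim_equal_check : Prop := ∀ (s : String), Dom_check s → Spec_check s (check s)

-- ===== LEMMAS AND PROOFS =====

-- concatenating the pieces with foldl is flattening
theorem foldl_append_flatten (xs : List (List Char)) (init : List Char) :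
    xs.foldl (fun a b => a ++ b) init = init ++ xs.flatten := by
  induction xs generalizing init with
  | nil => simp
  | cons x t ih => simp [List.foldl_cons, ih, List.append_assoc]

-- the pieces of split(" ") flatten to the space-free characters
theorem splitOn_go_flatten (fuel : Nat) (l cur : List Char) (acc : List (List Char))
    (h : l.length < fuel) :
    (PySem.Chars.splitOn.go [' '] fuel l cur acc).flatten
      = acc.reverse.flatten ++ cur.reverse ++ l.filter (fun c => c != ' ') := by
  induction fuel generalizing l cur acc with
  | zero => omega
  | succ n ih =>
    cases l with
    | nil => simp [PySem.Chars.splitOn.go]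
    | cons c t =>
      by_cases hc : c = ' '
      · subst hc
        rw [show PySem.Chars.splitOn.go [' '] (n+1) (' ' :: t) cur acc
              = PySem.Chars.splitOn.go [' '] n t [] (cur.reverse :: acc) by
            simp [PySem.Chars.splitOn.go, List.isPrefixOf]]
        rw [ih t [] (cur.reverse :: acc) (by simpa using Nat.lt_of_succ_lt_succ h)]
        simp [List.filter]
      · rw [show PySem.Chars.splitOn.go [' '] (n+1) (c :: t) cur acc
              = PySem.Chars.splitOn.go [' '] n t (c :: cur) acc by
            simp [PySem.Chars.splitOn.go, List.isPrefixOf,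
              (show ¬(' ' = c) from fun hh => hc hh.symm)]]
        rw [ih t (c :: cur) acc (by simpa using Nat.lt_of_succ_lt_succ h)]
        simp [hc, List.append_assoc]

-- replace(" ", "") is the same space-free characters
theorem replace_go_filter (fuel : Nat) (l acc : List Char) (h : l.length ≤ fuel) :
    PySem.Chars.replace.go [' '] [] fuel l acc
      = acc.reverse ++ l.filter (fun c => c != ' ') := by
  induction fuel generalizing l acc with
  | zero =>
    have : l = [] := List.length_eq_zero_iff.mp (Nat.le_zero.mp h)
    subst this; simp [PySem.Chars.replace.go]
  | succ n ih =>
    cases l with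
    | nil => simp [PySem.Chars.replace.go]
    | cons c t =>
      by_cases hc : c = ' '
      · subst hc
        rw [show PySem.Chars.replace.go [' '] [] (n+1) (' ' :: t) acc
              = PySem.Chars.replace.go [' '] [] n t acc by
            simp [PySem.Chars.replace.go, List.isPrefixOf]]
        rw [ih t acc (by simpa using Nat.le_of_succ_le_succ h)]
        simp [List.filter]
      · rw [show PySem.Chars.replace.go [' '] [] (n+1) (c :: t) acc
              = PySem.Chars.replace.go [' '] [] n t (c :: acc) by
            simp [PySem.Chars.replace.go, List.isPrefixOf,
              (show ¬(' ' = c) from fun hh => hc hh.symm)]]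
        rw [ih t (c :: acc) (by simpa using Nat.le_of_succ_le_succ h)]
        simp [hc]

theorem replace_filter (l : List Char) :
    PySem.Chars.replace l [' '] [] = l.filter (fun c => c != ' ') := by
  have := replace_go_filter l.length l [] (Nat.le_refl _)
  simpa [PySem.Chars.replace] using this

-- A's dict loop: the keys are the first occurrences, in order
theorem pairFold_keys (l : List Char) (d : PySem.Dict Char Int) (x : Int) :
    (l.foldl (fun p i => (p.1.insert i p.2, p.2 + 1)) (d, x)).1.keys
      = PySem.Set.update d.keys l := by
  induction l generalizing d x with
  | nil => simp [PySem.Set.update]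
  | cons c t ih =>
    rw [List.foldl_cons, ih]
    have hk : (d.insert c x).keys = PySem.Set.add d.keys c := by
      by_cases hc : d.contains c = true
      · rw [PySem.Dict.keys_insert_of_contains d x hc]
        have hmem : c ∈ d.keys := (PySem.Dict.contains_iff_mem_keys d c).mp hc
        simp [PySem.Set.add, hmem]
      · rw [PySem.Dict.keys_insert_of_not_contains d x (by simpa using hc)]
        have hnm : c ∉ d.keys := fun hm => hc ((PySem.Dict.contains_iff_mem_keys d c).mpr hm)
        simp [PySem.Set.add, hnm]
    simp [PySem.Set.update, hk]

-- a nodup list with the same members as l has length l.toFinset.card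
theorem dedup_length_card (l : List Char) :
    (PySem.List.dedup l).length = l.toFinset.card := by
  have hm : (PySem.List.dedup l).toFinset = l.toFinset := by
    apply Finset.ext; intro a
    simp [List.mem_toFinset]
  rw [← hm, List.toFinset_card_of_nodup (PySem.List.nodup_dedup l)]

-- B's scan on a sorted tail, with a last-seen character below every element
theorem countRuns_sorted (l : List Char) (n : Nat) (c0 : Char)
    (hs : l.Pairwise (· ≤ ·)) (hb : ∀ y ∈ l, c0 ≤ y) :
    (l.foldl (fun (p : Nat × Option Char) c => if some c ≠ p.2 then (p.1 + 1, some c) else p)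
        (n, some c0)).1 = n + (l.toFinset \ {c0}).card := by
  induction l generalizing n c0 with
  | nil => simp
  | cons x t ih =>
    rw [List.foldl_cons]
    rcases List.pairwise_cons.mp hs with ⟨hx, ht⟩
    by_cases hxc : x = c0
    · subst hxc
      rw [if_neg (by simp)]
      rw [ih n x ht hx]
      congr 1
      congr 1
      apply Finset.ext; intro a
      simp only [List.toFinset_cons, Finset.mem_sdiff, Finset.mem_insert,
        List.mem_toFinset, Finset.mem_singleton]
      tauto
    · have hlt : c0 < x := lt_of_le_of_ne (hb x (by simp)) (Ne.symm hxc)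
      rw [if_pos (by simpa using hxc)]
      rw [ih (n + 1) x ht hx]
      have hc0t : c0 ∉ t := by
        intro hm
        exact absurd (hx c0 hm) (not_le.mpr hlt)
      have : (x :: t).toFinset \ {c0} = insert x (t.toFinset \ {x}) := by
        apply Finset.ext; intro a
        simp only [List.toFinset_cons, Finset.mem_sdiff, Finset.mem_insert,
          List.mem_toFinset, Finset.mem_singleton]
        constructor
        · rintro ⟨h1 | h1, h2⟩
          · exact Or.inl h1
          · by_cases hax : a = x
            · exact Or.inl hax
            · exact Or.inr ⟨h1, hax⟩
        · rintro (h1 | ⟨h1, h2⟩)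
          · exact ⟨Or.inl h1, fun h => hxc (h1.symm.trans h)⟩
          · exact ⟨Or.inr h1, fun h => hc0t (h ▸ h1)⟩
      rw [this, Finset.card_insert_of_notMem (by simp)]
      omega

theorem countRuns_top (l : List Char) (hs : l.Pairwise (· ≤ ·)) :
    (l.foldl (fun (p : Nat × Option Char) c => if some c ≠ p.2 then (p.1 + 1, some c) else p)
        (0, none)).1 = l.toFinset.card := by
  cases l with
  | nil => simp
  | cons x t =>
    rw [List.foldl_cons]
    rcases List.pairwise_cons.mp hs with ⟨hx, ht⟩
    rw [if_pos (by simp)]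
    rw [countRuns_sorted t 1 x ht hx]
    have : (x :: t).toFinset = insert x (t.toFinset \ {x}) := by
      apply Finset.ext; intro a
      simp only [List.toFinset_cons, Finset.mem_sdiff, Finset.mem_insert,
        List.mem_toFinset, Finset.mem_singleton]
      constructor
      · rintro (h1 | h1)
        · exact Or.inl h1
        · by_cases hax : a = x
          · exact Or.inl hax
          · exact Or.inr ⟨h1, hax⟩
      · rintro (h1 | ⟨h1, h2⟩)
        · exact Or.inl h1
        · exact Or.inr h1
    rw [this, Finset.card_insert_of_notMem (by simp)]
    omega

-- ===== VERDICT (by name: the statement is the Claim_ definition above) =====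
theorem check_spec : Claim_equal_check := by
  intro s _
  unfold Spec_check check check_alt
  dsimp only
  set f := s.toList.filter (fun c => c != ' ') with hf
  -- A side: the concatenation k is f, and the dict size is the distinct count
  have hk : (PySem.Chars.splitOn s.toList [' ']).foldl (fun k i => k ++ i) ([] : List Char) = f := by
    rw [foldl_append_flatten]
    have := splitOn_go_flatten (s.toList.length + 1) s.toList [] [] (Nat.lt_succ_self _)
    simp [PySem.Chars.splitOn] at this ⊢
    simpa using this
  have hsizeA :
      ((f.foldl (fun (p : PySem.Dict Char Int × Int) i => (p.1.insert i p.2, p.2 + 1))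
        ((PySem.Dict.empty : PySem.Dict Char Int), (0 : Int))).1).size = f.toFinset.card := by
    have hkeys := pairFold_keys f (PySem.Dict.empty : PySem.Dict Char Int) 0
    have hsz : ∀ (d : PySem.Dict Char Int), d.size = d.keys.length := by
      intro d; simp [PySem.Dict.size, PySem.Dict.keys]
    rw [hsz, hkeys]
    have : PySem.Set.update (PySem.Dict.empty : PySem.Dict Char Int).keys f
        = PySem.List.dedup f := by
      simp [PySem.Set.update, PySem.List.dedup_eq_ofList, PySem.Set.ofList,
        PySem.Dict.keys_empty, PySem.Set.empty]
    rw [this, dedup_length_card]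
  -- B side: the sorted scan counts the same distinct characters
  have hrep : PySem.Chars.replace s.toList [' '] [] = f := replace_filter s.toList
  have hsorted := PySem.List.sorted_pairwise (PySem.Chars.replace s.toList [' '] []) (fun c => c)
  have hB := countRuns_top (PySem.List.sorted (PySem.Chars.replace s.toList [' '] []) (fun c => c))
      (by simpa using hsorted)
  have hperm : (PySem.List.sorted (PySem.Chars.replace s.toList [' '] []) (fun c => c)).toFinset
      = f.toFinset := by
    rw [← hrep]
    exact List.toFinset_eq_of_perm _ _ (PySem.List.sorted_perm _ _ _)
  rw [hk, hsizeA, hB, hperm]
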